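-- pv_equiv track=rewrite | github.com/victorlee115/kopos_connector | kopos_connector/kopos/api/fb_orders.py | _resolve_order_status
-- ===== SOURCE A (Python) =====
-- from typing import Any
--
-- def _resolve_order_status(results: list[dict[str, Any]], projection_type: str) -> str:
--     relevant = [row for row in results if row["projection_type"] == projection_type]
--     if not relevant:
--         return "Pending"
--     states = {row["state"] for row in relevant}
--     if "Failed" in states:
--         return "Failed"
--     if states == {"Succeeded"}:
--         return "Posted"
--     return "Pending"
-- ===== SOURCE B (Python) =====
-- def _resolve_order_status(results: list, projection_type: str) -> str:
--     found_relevant = False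
--     any_failed = False
--     all_succeeded = True
--     for row in results:
--         if row["projection_type"] == projection_type:
--             found_relevant = True
--             state = row["state"]
--             if state == "Failed":
--                 any_failed = True
--             if state != "Succeeded":
--                 all_succeeded = False
--     if any_failed:
--         return "Failed"
--     if found_relevant and all_succeeded:
--         return "Posted"
--     return "Pending"
-- ===== Notes on version B (the rewrite author's own statement) =====
-- stated objective: simpler
-- what changed: Replaces the intermediate relevant list and state set with one pass over results maintaining three boolean flags (found_relevant, any_failed, all_succeeded).
import Mathlib
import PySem

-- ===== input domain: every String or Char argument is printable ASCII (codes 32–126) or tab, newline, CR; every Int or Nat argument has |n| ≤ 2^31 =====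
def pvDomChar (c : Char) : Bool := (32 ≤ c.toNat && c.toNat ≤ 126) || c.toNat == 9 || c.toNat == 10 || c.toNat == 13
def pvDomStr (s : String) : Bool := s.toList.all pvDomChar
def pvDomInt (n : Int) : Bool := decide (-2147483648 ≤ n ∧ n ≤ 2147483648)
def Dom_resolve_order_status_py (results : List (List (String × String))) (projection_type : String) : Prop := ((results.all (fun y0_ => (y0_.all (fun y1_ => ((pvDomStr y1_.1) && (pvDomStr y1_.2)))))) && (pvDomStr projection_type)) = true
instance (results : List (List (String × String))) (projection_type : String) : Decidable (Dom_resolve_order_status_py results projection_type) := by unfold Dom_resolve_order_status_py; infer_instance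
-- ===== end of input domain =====

-- B replaces A's intermediate relevant-list and state-set with a single pass keeping three
-- boolean flags (objective: simpler). Equivalence is about the return value; neither mutates.

-- dict lookup row[k] (first matching key); total form, exact under Pre_ (key present)
def rowGet (row : List (String × String)) (k : String) : String :=
  ((row.find? (fun p => p.1 == k)).map Prod.snd).getD ""

-- ===== PORT A =====
def resolve_order_status_py (results : List (List (String × String))) (projection_type : String) : String :=
  let relevant := results.filter (fun row => rowGet row "projection_type" == projection_type)
  if relevant.isEmpty then "Pending"
  else
    let states : PySem.Set String := PySem.Set.ofList (relevant.map (fun row => rowGet row "state"))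
    if PySem.Set.contains states "Failed" then "Failed"
    else if PySem.Set.equal states (PySem.Set.ofList ["Succeeded"]) then "Posted"
    else "Pending"

-- ===== PORT B =====
def altStep (projection_type : String) (st : Bool × Bool × Bool) (row : List (String × String)) :
    Bool × Bool × Bool :=
  if rowGet row "projection_type" == projection_type then
    let s := rowGet row "state"
    (true, st.2.1 || s == "Failed", st.2.2 && !(s == "Succeeded") == false)
  else st

def resolve_order_status_py_alt (results : List (List (String × String))) (projection_type : String) : String :=
  let st := results.foldl (altStep projection_type) (false, false, true)
  if st.2.1 then "Failed"
  else if st.1 && st.2.2 then "Posted"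
  else "Pending"

-- ===== PRECONDITION & SPEC =====
-- Pre_ excludes exactly the inputs where Python raises KeyError: a row without key
-- "projection_type", or a relevant row (first "projection_type" value = projection_type)
-- without key "state".
def Pre_resolve_order_status_py (results : List (List (String × String))) (projection_type : String) : Prop :=
  ∀ row ∈ results, "projection_type" ∈ row.map Prod.fst ∧
    ((row.find? (fun p => p.1 == "projection_type")).map Prod.snd = some projection_type →
      "state" ∈ row.map Prod.fst)
instance (results : List (List (String × String))) (projection_type : String) : Decidable (Pre_resolve_order_status_py results projection_type) := by unfold Pre_resolve_order_status_py; infer_instance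

def pvWitness_resolve_order_status_py : (List (List (String × String))) × String :=
  ([[("projection_type", "fb"), ("state", "Succeeded")], [("projection_type", "other")]], "fb")

def Spec_resolve_order_status_py (results : List (List (String × String))) (projection_type : String) (out : String) : Prop := out = resolve_order_status_py_alt results projection_type
instance (results : List (List (String × String))) (projection_type : String) (out : String) : Decidable (Spec_resolve_order_status_py results projection_type out) := by unfold Spec_resolve_order_status_py; infer_instance

-- ===== CLAIM (what is proved, stated in full; the proofs are below) =====
def Claim_equal_resolve_order_status_py : Prop := ∀ (results : List (List (String × String))) (projection_type : String), Dom_resolve_order_status_py results projection_type → Pre_resolve_order_status_py results projection_type → Spec_resolve_order_status_py results projection_type (resolve_order_status_py results projection_type)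

-- ===== LEMMAS AND PROOFS =====

-- characterisation of B's fold in terms of A's relevant list
theorem foldl_altStep (pt : String) (l : List (List (String × String))) (f af asu : Bool) :
    l.foldl (altStep pt) (f, af, asu) =
      (f || !(l.filter (fun row => rowGet row "projection_type" == pt)).isEmpty,
       af || (l.filter (fun row => rowGet row "projection_type" == pt)).any
               (fun r => rowGet r "state" == "Failed"),
       asu && (l.filter (fun row => rowGet row "projection_type" == pt)).all
               (fun r => rowGet r "state" == "Succeeded")) := by
  induction l generalizing f af asu with
  | nil => simp
  | cons r l ih =>
    simp only [List.foldl_cons, altStep, List.filter_cons]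
    by_cases h : (rowGet r "projection_type" == pt) = true
    · simp [h, ih, Bool.or_assoc, Bool.and_assoc]
    · simp [h, ih]

theorem set_all_succeeded (l : List String) (hne : l ≠ []) :
    PySem.Set.equal (PySem.Set.ofList l) (PySem.Set.ofList ["Succeeded"]) =
      l.all (fun s => s == "Succeeded") := by
  by_cases h : l.all (fun s => s == "Succeeded") = true
  · simp only [h]
    rw [PySem.Set.equal_iff]
    intro x
    simp only [PySem.Set.mem_ofList, List.mem_singleton]
    simp only [List.all_eq_true, beq_iff_eq] at h
    constructor
    · exact fun hx => h x hx
    · rintro rfl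
      obtain ⟨y, hy⟩ := List.exists_mem_of_ne_nil l hne
      exact h y hy ▸ hy
  · simp only [h]
    rw [Bool.eq_false_iff]
    intro hEq
    rw [PySem.Set.equal_iff] at hEq
    simp only [List.all_eq_true, beq_iff_eq] at h
    push Not at h
    obtain ⟨x, hx, hxne⟩ := h
    exact hxne (by simpa using (hEq x).mp (by simpa [PySem.Set.mem_ofList] using hx))

-- ===== VERDICT (by name: the statement is the Claim_ definition above) =====
theorem resolve_order_status_py_spec : Claim_equal_resolve_order_status_py := by
  intro results pt _ _
  unfold Spec_resolve_order_status_py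
  unfold resolve_order_status_py resolve_order_status_py_alt
  rw [foldl_altStep]
  set rel := results.filter (fun row => rowGet row "projection_type" == pt) with hrel
  by_cases hempty : rel.isEmpty
  · simp [List.isEmpty_iff.mp hempty]
  · rw [if_neg hempty]
    have hne : rel ≠ [] := by simpa [List.isEmpty_iff] using hempty
    have hmapne : rel.map (fun row => rowGet row "state") ≠ [] := by simpa using hne
    by_cases hfail : (PySem.Set.contains
        (PySem.Set.ofList (rel.map (fun row => rowGet row "state"))) "Failed") = true
    · have hany : rel.any (fun r => rowGet r "state" == "Failed") = true := by
        rw [PySem.Set.contains_iff, PySem.Set.mem_ofList] at hfail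
        simp only [List.any_eq_true, beq_iff_eq]
        simpa [eq_comm] using (List.mem_map.mp hfail)
      rw [if_pos hfail]
      simp [hany]
    · have hnofail : rel.any (fun r => rowGet r "state" == "Failed") = false := by
        rw [Bool.eq_false_iff]
        intro hany
        apply hfail
        rw [PySem.Set.contains_iff, PySem.Set.mem_ofList]
        simp only [List.any_eq_true, beq_iff_eq] at hany
        obtain ⟨r, hr, hrs⟩ := hany
        exact List.mem_map.mpr ⟨r, hr, hrs⟩
      have hset := set_all_succeeded (rel.map (fun row => rowGet row "state")) hmapne
      simp only [List.all_map] at hset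
      rw [if_neg hfail, hset]
      simp [hnofail, Function.comp, hempty]
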